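-- pv_equiv track=rewrite | github.com/ahnsoheee/Algorithm | Programmers/2022_KAKAO_BLIND_RECRUITMENT/파괴되지 않은 건물.py | solution
-- ===== SOURCE A (Python) =====
-- def solution(board, skill):
--     answer = 0
--     row = len(board)
--     col = len(board[0])
--     d = [[0] * (col + 1) for _ in range(row+ 1)]
--
--     for sk in skill:
--         type, r1, c1, r2, c2, degree = sk
--         if type == 1:
--             degree = -degree
--
--         d[r1][c1] += degree
--         d[r1][c2+1] -= degree
--         d[r2+1][c1] -= degree
--         d[r2+1][c2+1] += degree
--
--     # 위 -> 아래 누적합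
--     for j in range(col):
--         for i in range(1, row):
--             d[i][j] += d[i-1][j]
--
--     # 왼 -> 오 누적합
--     for i in range(row):
--         for j in range(1, col):
--             d[i][j] += d[i][j-1]
--
--     for i in range(row):
--         for j in range(col):
--             if board[i][j] + d[i][j] > 0:
--                 answer += 1
--
--     return answer
-- ===== SOURCE B (Python) =====
-- def solution(board, skill):
--     row = len(board)
--     col = len(board[0])
--     answer = 0
--     for i in range(row):
--         for j in range(col):
--             h = board[i][j]
--             for sk in skill:
--                 type, r1, c1, r2, c2, degree = sk
--                 if r1 <= i <= r2 and c1 <= j <= c2: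
--                     h += -degree if type == 1 else degree
--             if h > 0:
--                 answer += 1
--     return answer
-- ===== Notes on version B (the rewrite author's own statement) =====
-- stated objective: simpler
-- what changed: Replaces the 2-D difference-array stamp plus two prefix-sum passes over an auxiliary (row+1)x(col+1) grid by a direct per-cell scan that, for each board cell, sums the contribution of every skill whose rectangle covers it; no auxiliary grid or mutation at all.
-- outside the precondition, e.g. on solution([[1]], [[0, -1, 0, -1, 0, 1]]): A returns 0, B returns 1
import Mathlib
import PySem

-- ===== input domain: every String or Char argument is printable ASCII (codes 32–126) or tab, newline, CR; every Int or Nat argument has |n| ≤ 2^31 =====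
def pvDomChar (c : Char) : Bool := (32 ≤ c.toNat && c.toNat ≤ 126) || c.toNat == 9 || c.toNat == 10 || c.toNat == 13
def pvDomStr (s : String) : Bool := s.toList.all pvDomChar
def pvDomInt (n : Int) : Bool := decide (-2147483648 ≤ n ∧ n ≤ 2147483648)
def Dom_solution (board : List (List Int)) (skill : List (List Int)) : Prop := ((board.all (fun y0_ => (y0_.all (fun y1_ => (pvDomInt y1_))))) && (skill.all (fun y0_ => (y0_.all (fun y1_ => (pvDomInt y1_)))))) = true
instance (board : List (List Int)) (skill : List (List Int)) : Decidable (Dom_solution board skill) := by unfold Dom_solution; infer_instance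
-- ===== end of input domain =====

-- B replaces A's 2-D difference-array stamp + two prefix-sum passes by a direct per-cell sum of
-- the covering skills' deltas (simpler: no auxiliary grid, no mutation; not faster).

-- ===== PORT A =====

-- g[i][j]  as an Int read: Python wrap semantics via pyGetD; default 0/[] exactly where Python raises (excluded by Pre_)
def pvRead2 (g : List (List Int)) (i j : Int) : Int :=
  PySem.List.pyGetD (PySem.List.pyGetD g i []) j 0

-- g[i][j] += δ : pySetD is a no-op exactly where Python raises IndexError (excluded by Pre_)
def pvUpd2 (g : List (List Int)) (i j δ : Int) : List (List Int) :=
  PySem.List.pySetD g i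
    (PySem.List.pySetD (PySem.List.pyGetD g i []) j (pvRead2 g i j + δ))

-- one iteration of A's first loop; the '_' branch is where Python's unpacking raises ValueError (excluded by Pre_)
def pvStamp (g : List (List Int)) (sk : List Int) : List (List Int) :=
  match sk with
  | [t, r1, c1, r2, c2, deg0] =>
    let degree := if t = 1 then -deg0 else deg0
    let g1 := pvUpd2 g r1 c1 degree
    let g2 := pvUpd2 g1 r1 (c2 + 1) (-degree)
    let g3 := pvUpd2 g2 (r2 + 1) c1 (-degree)
    pvUpd2 g3 (r2 + 1) (c2 + 1) degree
  | _ => g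

-- inner body of the top→down pass: d[i][j] += d[i-1][j]
def pvVStep (j : Int) (g : List (List Int)) (i : Int) : List (List Int) :=
  pvUpd2 g i j (pvRead2 g (i - 1) j)

def pvVPass (row : Int) (g : List (List Int)) (j : Int) : List (List Int) :=
  (PySem.List.pyRange 1 row 1).foldl (pvVStep j) g

-- inner body of the left→right pass: d[i][j] += d[i][j-1]
def pvHStep (i : Int) (g : List (List Int)) (j : Int) : List (List Int) :=
  pvUpd2 g i j (pvRead2 g i (j - 1))

def pvHPass (col : Int) (g : List (List Int)) (i : Int) : List (List Int) :=
  (PySem.List.pyRange 1 col 1).foldl (pvHStep i) g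

def pvCountCellA (board g : List (List Int)) (i : Int) (a : Int) (j : Int) : Int :=
  if pvRead2 board i j + pvRead2 g i j > 0 then a + 1 else a

def pvCountRowA (board g : List (List Int)) (col : Int) (a : Int) (i : Int) : Int :=
  (PySem.List.pyRange 0 col 1).foldl (pvCountCellA board g i) a

def solution (board : List (List Int)) (skill : List (List Int)) : Int :=
  let row : Int := board.length
  -- board[0]: Python raises IndexError on an empty board (excluded by Pre_)
  let col : Int := (PySem.List.pyGetD board 0 []).length
  let d0 := List.replicate (row.toNat + 1) (List.replicate (col.toNat + 1) (0 : Int))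
  let d1 := skill.foldl pvStamp d0
  let d2 := (PySem.List.pyRange 0 col 1).foldl (pvVPass row) d1
  let d3 := (PySem.List.pyRange 0 row 1).foldl (pvHPass col) d2
  (PySem.List.pyRange 0 row 1).foldl (pvCountRowA board d3 col) 0

-- ===== PORT B =====

-- one iteration of B's innermost loop; the '_' branch is where Python's unpacking raises ValueError (excluded by Pre_)
def pvContrib (i j : Int) (h : Int) (sk : List Int) : Int :=
  match sk with
  | [t, r1, c1, r2, c2, degree] =>
    if r1 ≤ i ∧ i ≤ r2 ∧ c1 ≤ j ∧ j ≤ c2 then h + (if t = 1 then -degree else degree) else h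
  | _ => h

def pvCellB (board : List (List Int)) (skill : List (List Int)) (i : Int) (a : Int) (j : Int) : Int :=
  let h := skill.foldl (pvContrib i j) (pvRead2 board i j)
  if h > 0 then a + 1 else a

def pvRowB (board : List (List Int)) (skill : List (List Int)) (col : Int) (a : Int) (i : Int) : Int :=
  (PySem.List.pyRange 0 col 1).foldl (pvCellB board skill i) a

def solution_alt (board : List (List Int)) (skill : List (List Int)) : Int :=
  let row : Int := board.length
  let col : Int := (PySem.List.pyGetD board 0 []).length
  (PySem.List.pyRange 0 row 1).foldl (pvRowB board skill col) 0

-- ===== PRECONDITION & SPEC =====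
-- Pre_ restricts to the problem's natural domain: a nonempty board whose rows are at least as long as
-- the first row, and skills that are six values [type,r1,c1,r2,c2,degree] with a rectangle inside the
-- board; outside it A raises (IndexError/ValueError) or silently applies Python's negative-index wraparound.
def Pre_solution (board : List (List Int)) (skill : List (List Int)) : Prop :=
  board ≠ [] ∧
  (∀ r ∈ board, (PySem.List.pyGetD board 0 ([] : List Int)).length ≤ r.length) ∧
  (∀ sk ∈ skill, sk.length = 6 ∧
    0 ≤ PySem.List.pyGetD sk 1 0 ∧ PySem.List.pyGetD sk 1 0 ≤ PySem.List.pyGetD sk 3 0 ∧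
    PySem.List.pyGetD sk 3 0 < (board.length : Int) ∧
    0 ≤ PySem.List.pyGetD sk 2 0 ∧ PySem.List.pyGetD sk 2 0 ≤ PySem.List.pyGetD sk 4 0 ∧
    PySem.List.pyGetD sk 4 0 < ((PySem.List.pyGetD board 0 ([] : List Int)).length : Int))
instance (board : List (List Int)) (skill : List (List Int)) : Decidable (Pre_solution board skill) := by
  unfold Pre_solution; infer_instance

def pvWitness_solution : List (List Int) × List (List Int) :=
  ([[5, 5], [0, 1]], [[1, 0, 0, 1, 1, 3], [2, 0, 0, 0, 0, 4]])

def Spec_solution (board : List (List Int)) (skill : List (List Int)) (out : Int) : Prop := out = solution_alt board skill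
instance (board : List (List Int)) (skill : List (List Int)) (out : Int) : Decidable (Spec_solution board skill out) := by unfold Spec_solution; infer_instance

-- ===== CLAIM (what is proved, stated in full; the proofs are below) =====
def Claim_equal_solution : Prop := ∀ (board : List (List Int)) (skill : List (List Int)), Dom_solution board skill → Pre_solution board skill → Spec_solution board skill (solution board skill)

-- ===== LEMMAS AND PROOFS =====

-- grid accessed at Nat coordinates
def pvGet2 (g : List (List Int)) (a b : Nat) : Int := (g.getD a []).getD b 0

def pvDims (g : List (List Int)) (R C : Nat) : Prop := g.length = R ∧ ∀ r ∈ g, r.length = C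

-- mathematical stamp of one proper skill (the four difference-array corners)
def pvDelta (sk : List Int) (a b : Nat) : Int :=
  match sk with
  | [t, r1, c1, r2, c2, deg0] =>
    let deg := if t = 1 then -deg0 else deg0
    (if (a:Int) = r1 ∧ (b:Int) = c1 then deg else 0)
    + (if (a:Int) = r1 ∧ (b:Int) = c2 + 1 then -deg else 0)
    + (if (a:Int) = r2 + 1 ∧ (b:Int) = c1 then -deg else 0)
    + (if (a:Int) = r2 + 1 ∧ (b:Int) = c2 + 1 then deg else 0)
  | _ => 0

-- one skill's direct contribution to cell (i,j)
def pvRect (sk : List Int) (i j : Int) : Int :=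
  match sk with
  | [t, r1, c1, r2, c2, deg0] =>
    if r1 ≤ i ∧ i ≤ r2 ∧ c1 ≤ j ∧ j ≤ c2 then (if t = 1 then -deg0 else deg0) else 0
  | _ => 0

def pvProper (R C : Nat) (sk : List Int) : Prop :=
  ∃ t r1 c1 r2 c2 deg, sk = [t, r1, c1, r2, c2, deg] ∧
    0 ≤ r1 ∧ r1 ≤ r2 ∧ r2 < (R:Int) ∧ 0 ≤ c1 ∧ c1 ≤ c2 ∧ c2 < (C:Int)

theorem pvGetD_set_eq {α : Type} (l : List α) (n a : Nat) (v : α) (d : α) (h : n < l.length) :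
    (l.set n v).getD a d = if a = n then v else l.getD a d := by
  rcases eq_or_ne a n with rfl|hne
  · simp [List.getD, List.getElem?_set_self h]
  · simp [List.getD, List.getElem?_set_ne (Ne.symm hne), hne]

theorem pvDims_row (g : List (List Int)) (R C : Nat) (hg : pvDims g R C) (a : Nat) (ha : a < R) :
    (g.getD a []).length = C := by
  have hlt : a < g.length := by rw [hg.1]; exact ha
  rw [List.getD_eq_getElem _ _ hlt]
  exact hg.2 _ (List.getElem_mem _)

theorem pvRead2_eq (g : List (List Int)) (i j : Int) (hi : 0 ≤ i) (hj : 0 ≤ j) :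
    pvRead2 g i j = pvGet2 g i.toNat j.toNat := by
  obtain ⟨n, rfl⟩ : ∃ n : Nat, i = (n:Int) := ⟨i.toNat, (Int.toNat_of_nonneg hi).symm⟩
  obtain ⟨m, rfl⟩ : ∃ m : Nat, j = (m:Int) := ⟨j.toNat, (Int.toNat_of_nonneg hj).symm⟩
  simp [pvRead2, pvGet2, PySem.List.pyGetD_natCast]

theorem pvGet2_upd2 (g : List (List Int)) (R C : Nat) (hg : pvDims g R C) (i j δ : Int)
    (hi : 0 ≤ i) (hiR : i < (R:Int)) (hj : 0 ≤ j) (hjC : j < (C:Int)) (a b : Nat) :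
    pvGet2 (pvUpd2 g i j δ) a b =
      if (a:Int) = i ∧ (b:Int) = j then pvGet2 g a b + δ else pvGet2 g a b := by
  obtain ⟨n, rfl⟩ : ∃ n : Nat, i = (n:Int) := ⟨i.toNat, (Int.toNat_of_nonneg hi).symm⟩
  obtain ⟨m, rfl⟩ : ∃ m : Nat, j = (m:Int) := ⟨j.toNat, (Int.toNat_of_nonneg hj).symm⟩
  have hlen : g.length = R := hg.1
  have hnR : n < R := by exact_mod_cast hiR
  have hmC : m < C := by exact_mod_cast hjC
  have hrow : (g.getD n []).length = C := pvDims_row g R C hg n hnR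
  unfold pvUpd2 pvRead2
  simp only [PySem.List.pySetD_natCast, PySem.List.pyGetD_natCast]
  unfold pvGet2
  rw [pvGetD_set_eq _ _ _ _ _ (by omega)]
  rcases eq_or_ne a n with rfl|ha
  · rw [if_pos rfl, pvGetD_set_eq _ _ _ _ _ (by omega)]
    rcases eq_or_ne b m with rfl|hb
    · rw [if_pos rfl, if_pos ⟨rfl, rfl⟩]
    · rw [if_neg hb, if_neg (fun h => hb (by exact_mod_cast h.2))]
  · rw [if_neg ha, if_neg (fun h => ha (by exact_mod_cast h.1))]

theorem pvDims_upd2 (g : List (List Int)) (R C : Nat) (hg : pvDims g R C) (i j δ : Int)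
    (hi : 0 ≤ i) (hiR : i < (R:Int)) (hj : 0 ≤ j) :
    pvDims (pvUpd2 g i j δ) R C := by
  obtain ⟨n, rfl⟩ : ∃ n : Nat, i = (n:Int) := ⟨i.toNat, (Int.toNat_of_nonneg hi).symm⟩
  obtain ⟨m, rfl⟩ : ∃ m : Nat, j = (m:Int) := ⟨j.toNat, (Int.toNat_of_nonneg hj).symm⟩
  have hnR : n < R := by exact_mod_cast hiR
  unfold pvUpd2 pvRead2
  simp only [PySem.List.pySetD_natCast, PySem.List.pyGetD_natCast]
  refine ⟨by simpa using hg.1, ?_⟩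
  intro r hr
  rcases List.mem_or_eq_of_mem_set hr with h|rfl
  · exact hg.2 _ h
  · simpa using pvDims_row g R C hg n hnR

theorem pvGet2_stamp (g : List (List Int)) (R C : Nat) (hg : pvDims g (R+1) (C+1))
    (sk : List Int) (hsk : pvProper R C sk) :
    pvDims (pvStamp g sk) (R+1) (C+1) ∧
      ∀ a b : Nat, pvGet2 (pvStamp g sk) a b = pvGet2 g a b + pvDelta sk a b := by
  obtain ⟨t, r1, c1, r2, c2, deg, rfl, h1, h2, h3, h4, h5, h6⟩ := hsk
  set deg' := if t = 1 then -deg else deg with hdeg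
  have hstamp : pvStamp g [t, r1, c1, r2, c2, deg] =
      pvUpd2 (pvUpd2 (pvUpd2 (pvUpd2 g r1 c1 deg') r1 (c2 + 1) (-deg')) (r2 + 1) c1 (-deg'))
        (r2 + 1) (c2 + 1) deg' := rfl
  have hD : ∀ x y : Nat, pvDelta [t, r1, c1, r2, c2, deg] x y =
      (if (x:Int) = r1 ∧ (y:Int) = c1 then deg' else 0)
      + (if (x:Int) = r1 ∧ (y:Int) = c2 + 1 then -deg' else 0)
      + (if (x:Int) = r2 + 1 ∧ (y:Int) = c1 then -deg' else 0)
      + (if (x:Int) = r2 + 1 ∧ (y:Int) = c2 + 1 then deg' else 0) := fun _ _ => rfl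
  rw [hstamp]
  have d1 := pvDims_upd2 g _ _ hg r1 c1 deg' h1 (by push_cast; omega) h4
  have d2 := pvDims_upd2 _ _ _ d1 r1 (c2+1) (-deg') h1 (by push_cast; omega) (by omega)
  have d3 := pvDims_upd2 _ _ _ d2 (r2+1) c1 (-deg') (by omega) (by push_cast; omega) h4
  have d4 := pvDims_upd2 _ _ _ d3 (r2+1) (c2+1) deg' (by omega) (by push_cast; omega) (by omega)
  refine ⟨d4, ?_⟩
  intro a b
  rw [pvGet2_upd2 _ _ _ d3 _ _ _ (by omega) (by push_cast; omega) (by omega) (by push_cast; omega),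
      pvGet2_upd2 _ _ _ d2 _ _ _ (by omega) (by push_cast; omega) (by omega) (by push_cast; omega),
      pvGet2_upd2 _ _ _ d1 _ _ _ (by omega) (by push_cast; omega) (by omega) (by push_cast; omega),
      pvGet2_upd2 _ _ _ hg _ _ _ (by omega) (by push_cast; omega) (by omega) (by push_cast; omega),
      hD a b]
  split_ifs <;> omega

theorem pvGet2_stampFold (R C : Nat) (S : List (List Int)) :
    ∀ g, pvDims g (R+1) (C+1) → (∀ sk ∈ S, pvProper R C sk) →
    pvDims (S.foldl pvStamp g) (R+1) (C+1) ∧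
      ∀ a b : Nat, pvGet2 (S.foldl pvStamp g) a b =
        pvGet2 g a b + (S.map (fun sk => pvDelta sk a b)).sum := by
  induction S with
  | nil => intro g hg _; exact ⟨hg, by simp⟩
  | cons sk S ih =>
    intro g hg hS
    have hsk := hS sk (by simp)
    obtain ⟨hd, hv⟩ := pvGet2_stamp g R C hg sk hsk
    obtain ⟨hd', hv'⟩ := ih (pvStamp g sk) hd (fun x hx => hS x (by simp [hx]))
    refine ⟨hd', ?_⟩
    intro a b
    simp only [List.foldl_cons, hv' a b, hv a b, List.map_cons, List.sum_cons]
    ring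

-- vertical pass, one column j, first k rows
theorem pvVPass_col (R C : Nat) (j : Int) (hj : 0 ≤ j) (hjC : j < ((C:Int) + 1)) :
    ∀ (k : Nat), k ≤ R → ∀ g, pvDims g (R+1) (C+1) →
    pvDims ((PySem.List.pyRange 1 (k:Int) 1).foldl (pvVStep j) g) (R+1) (C+1) ∧
      ∀ a b : Nat, pvGet2 ((PySem.List.pyRange 1 (k:Int) 1).foldl (pvVStep j) g) a b =
        if (b:Int) = j ∧ a < k then ∑ x ∈ Finset.range (a+1), pvGet2 g x b
        else pvGet2 g a b := by
  intro k
  induction k with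
  | zero =>
    intro _ g hg
    rw [PySem.List.pyRange_one_eq_nil (by omega)]
    refine ⟨hg, ?_⟩
    intro a b
    simp only [List.foldl_nil]
    rw [if_neg (by omega)]
  | succ k ih =>
    intro hk g hg
    rcases Nat.eq_zero_or_pos k with rfl|hkpos
    · rw [show ((0:Nat)+1 : Nat) = 1 by rfl, PySem.List.pyRange_one_eq_nil (by omega)]
      refine ⟨hg, ?_⟩
      intro a b
      simp only [List.foldl_nil]
      split_ifs with h
      · have : a = 0 := by omega
        subst this; simp
      · rfl
    · obtain ⟨hd, hv⟩ := ih (by omega) g hg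
      have hsplit : PySem.List.pyRange 1 ((k+1 : Nat):Int) 1 =
          PySem.List.pyRange 1 (k:Int) 1 ++ [(k:Int)] := by
        push_cast
        exact PySem.List.pyRange_one_succ_right (by omega)
      rw [hsplit, List.foldl_append]
      set G := (PySem.List.pyRange 1 (k:Int) 1).foldl (pvVStep j) g with hG
      simp only [List.foldl_cons, List.foldl_nil]
      obtain ⟨m, rfl⟩ : ∃ m : Nat, j = (m:Int) := ⟨j.toNat, (Int.toNat_of_nonneg hj).symm⟩
      have hmC : m < C + 1 := by exact_mod_cast hjC
      have hread : pvRead2 G ((k:Int) - 1) (m:Int) = ∑ x ∈ Finset.range k, pvGet2 g x m := by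
        have h1 : ((k:Int) - 1) = ((k-1 : Nat) : Int) := by push_cast [hkpos]; ring
        rw [h1, pvRead2_eq G _ _ (by omega) (by omega)]
        simp only [Int.toNat_natCast]
        rw [hv (k-1) m]
        rw [if_pos ⟨rfl, by omega⟩, show k - 1 + 1 = k by omega]
      have hup := pvGet2_upd2 G _ _ hd (k:Int) (m:Int)
        (∑ x ∈ Finset.range k, pvGet2 g x m) (by omega)
        (by push_cast; omega) (by omega) (by push_cast; omega)
      constructor
      · exact pvDims_upd2 G _ _ hd _ _ _ (by omega) (by push_cast; omega) (by omega)
      · intro a b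
        unfold pvVStep
        rw [hread, hup a b]
        rcases eq_or_ne a k with hak|ha
        · rcases eq_or_ne b m with hbm|hb
          · rw [if_pos ⟨by exact_mod_cast hak, by exact_mod_cast hbm⟩,
                if_pos ⟨by exact_mod_cast hbm, by omega⟩, hv a b, if_neg (by omega),
                hak, hbm, Finset.sum_range_succ]
            ring
          · rw [if_neg (fun h => hb (by exact_mod_cast h.2)),
                hv a b, if_neg (fun h => hb (by exact_mod_cast h.1)),
                if_neg (fun h => hb (by exact_mod_cast h.1))]
        · rw [if_neg (by intro h; exact ha (by exact_mod_cast h.1)), hv a b]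
          rcases eq_or_ne b m with hbm|hb
          · by_cases hak : a < k
            · rw [if_pos ⟨by exact_mod_cast hbm, hak⟩,
                  if_pos ⟨by exact_mod_cast hbm, by omega⟩]
            · rw [if_neg (by omega), if_neg (by omega)]
          · rw [if_neg (fun h => hb (by exact_mod_cast h.1)),
                if_neg (fun h => hb (by exact_mod_cast h.1))]

-- vertical pass over the first m columns
theorem pvVPass_all (R C : Nat) :
    ∀ (m : Nat), m ≤ C → ∀ g, pvDims g (R+1) (C+1) →
    pvDims ((PySem.List.pyRange 0 (m:Int) 1).foldl (pvVPass (R:Int)) g) (R+1) (C+1) ∧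
      ∀ a b : Nat, pvGet2 ((PySem.List.pyRange 0 (m:Int) 1).foldl (pvVPass (R:Int)) g) a b =
        if a < R ∧ b < m then ∑ x ∈ Finset.range (a+1), pvGet2 g x b
        else pvGet2 g a b := by
  intro m
  induction m with
  | zero =>
    intro _ g hg
    rw [PySem.List.pyRange_one_eq_nil (by omega)]
    refine ⟨hg, ?_⟩
    intro a b
    simp only [List.foldl_nil]
    rw [if_neg (by omega)]
  | succ m ih =>
    intro hm g hg
    obtain ⟨hd, hv⟩ := ih (by omega) g hg
    have hsplit : PySem.List.pyRange 0 ((m+1 : Nat):Int) 1 =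
        PySem.List.pyRange 0 (m:Int) 1 ++ [(m:Int)] := by
      push_cast
      exact PySem.List.pyRange_one_succ_right (by omega)
    rw [hsplit, List.foldl_append]
    set G := (PySem.List.pyRange 0 (m:Int) 1).foldl (pvVPass (R:Int)) g with hG
    simp only [List.foldl_cons, List.foldl_nil]
    obtain ⟨hcd, hcv⟩ := pvVPass_col R C (m:Int) (by omega) (by omega) R
      (le_refl R) G hd
    refine ⟨hcd, ?_⟩
    intro a b
    unfold pvVPass
    rw [hcv a b]
    rcases eq_or_ne b m with rfl|hb
    · by_cases haR : a < R
      · rw [if_pos ⟨rfl, haR⟩, if_pos ⟨haR, by omega⟩]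
        apply Finset.sum_congr rfl
        intro x _
        rw [hv x b, if_neg (by omega)]
      · rw [if_neg (by omega), hv a b, if_neg (by omega), if_neg (by omega)]
    · rw [if_neg (fun h => hb (by exact_mod_cast h.1)), hv a b]
      by_cases hsm : a < R ∧ b < m
      · rw [if_pos hsm, if_pos ⟨hsm.1, by omega⟩]
      · rw [if_neg hsm, if_neg (by omega)]

-- horizontal pass, one row i, first k columns
theorem pvHPass_row (R C : Nat) (i : Int) (hi : 0 ≤ i) (hiR : i < ((R:Int) + 1)) :
    ∀ (k : Nat), k ≤ C → ∀ g, pvDims g (R+1) (C+1) →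
    pvDims ((PySem.List.pyRange 1 (k:Int) 1).foldl (pvHStep i) g) (R+1) (C+1) ∧
      ∀ a b : Nat, pvGet2 ((PySem.List.pyRange 1 (k:Int) 1).foldl (pvHStep i) g) a b =
        if (a:Int) = i ∧ b < k then ∑ y ∈ Finset.range (b+1), pvGet2 g a y
        else pvGet2 g a b := by
  intro k
  induction k with
  | zero =>
    intro _ g hg
    rw [PySem.List.pyRange_one_eq_nil (by omega)]
    refine ⟨hg, ?_⟩
    intro a b
    simp only [List.foldl_nil]
    rw [if_neg (by omega)]
  | succ k ih =>
    intro hk g hg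
    rcases Nat.eq_zero_or_pos k with rfl|hkpos
    · rw [show ((0:Nat)+1 : Nat) = 1 by rfl, PySem.List.pyRange_one_eq_nil (by omega)]
      refine ⟨hg, ?_⟩
      intro a b
      simp only [List.foldl_nil]
      split_ifs with h
      · have : b = 0 := by omega
        subst this; simp
      · rfl
    · obtain ⟨hd, hv⟩ := ih (by omega) g hg
      have hsplit : PySem.List.pyRange 1 ((k+1 : Nat):Int) 1 =
          PySem.List.pyRange 1 (k:Int) 1 ++ [(k:Int)] := by
        push_cast
        exact PySem.List.pyRange_one_succ_right (by omega)
      rw [hsplit, List.foldl_append]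
      set G := (PySem.List.pyRange 1 (k:Int) 1).foldl (pvHStep i) g with hG
      simp only [List.foldl_cons, List.foldl_nil]
      obtain ⟨n, rfl⟩ : ∃ n : Nat, i = (n:Int) := ⟨i.toNat, (Int.toNat_of_nonneg hi).symm⟩
      have hnR : n < R + 1 := by exact_mod_cast hiR
      have hread : pvRead2 G (n:Int) ((k:Int) - 1) = ∑ y ∈ Finset.range k, pvGet2 g n y := by
        have h1 : ((k:Int) - 1) = ((k-1 : Nat) : Int) := by push_cast [hkpos]; ring
        rw [h1, pvRead2_eq G _ _ (by omega) (by omega)]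
        simp only [Int.toNat_natCast]
        rw [hv n (k-1), if_pos ⟨rfl, by omega⟩, show k - 1 + 1 = k by omega]
      have hup := pvGet2_upd2 G _ _ hd (n:Int) (k:Int)
        (∑ y ∈ Finset.range k, pvGet2 g n y) (by omega)
        (by push_cast; omega) (by omega) (by push_cast; omega)
      constructor
      · exact pvDims_upd2 G _ _ hd _ _ _ (by omega) (by push_cast; omega) (by omega)
      · intro a b
        unfold pvHStep
        rw [hread, hup a b]
        rcases eq_or_ne b k with hbk|hb
        · rcases eq_or_ne a n with han|ha
          · rw [if_pos ⟨by exact_mod_cast han, by exact_mod_cast hbk⟩,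
                if_pos ⟨by exact_mod_cast han, by omega⟩, hv a b, if_neg (by omega),
                han, hbk, Finset.sum_range_succ]
            ring
          · rw [if_neg (by intro h; exact ha (by exact_mod_cast h.1)),
                hv a b, if_neg (by intro h; exact ha (by exact_mod_cast h.1)),
                if_neg (by intro h; exact ha (by exact_mod_cast h.1))]
        · rw [if_neg (fun h => hb (by exact_mod_cast h.2)), hv a b]
          rcases eq_or_ne a n with han|ha
          · by_cases hbk2 : b < k
            · rw [if_pos ⟨by exact_mod_cast han, hbk2⟩,
                  if_pos ⟨by exact_mod_cast han, by omega⟩]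
            · rw [if_neg (by omega), if_neg (by omega)]
          · rw [if_neg (by intro h; exact ha (by exact_mod_cast h.1)),
                if_neg (by intro h; exact ha (by exact_mod_cast h.1))]

-- horizontal pass over the first m rows
theorem pvHPass_all (R C : Nat) :
    ∀ (m : Nat), m ≤ R → ∀ g, pvDims g (R+1) (C+1) →
    pvDims ((PySem.List.pyRange 0 (m:Int) 1).foldl (pvHPass (C:Int)) g) (R+1) (C+1) ∧
      ∀ a b : Nat, pvGet2 ((PySem.List.pyRange 0 (m:Int) 1).foldl (pvHPass (C:Int)) g) a b =
        if a < m ∧ b < C then ∑ y ∈ Finset.range (b+1), pvGet2 g a y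
        else pvGet2 g a b := by
  intro m
  induction m with
  | zero =>
    intro _ g hg
    rw [PySem.List.pyRange_one_eq_nil (by omega)]
    refine ⟨hg, ?_⟩
    intro a b
    simp only [List.foldl_nil]
    rw [if_neg (by omega)]
  | succ m ih =>
    intro hm g hg
    obtain ⟨hd, hv⟩ := ih (by omega) g hg
    have hsplit : PySem.List.pyRange 0 ((m+1 : Nat):Int) 1 =
        PySem.List.pyRange 0 (m:Int) 1 ++ [(m:Int)] := by
      push_cast
      exact PySem.List.pyRange_one_succ_right (by omega)
    rw [hsplit, List.foldl_append]
    set G := (PySem.List.pyRange 0 (m:Int) 1).foldl (pvHPass (C:Int)) g with hG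
    simp only [List.foldl_cons, List.foldl_nil]
    obtain ⟨hcd, hcv⟩ := pvHPass_row R C (m:Int) (by omega) (by omega) C
      (le_refl C) G hd
    refine ⟨hcd, ?_⟩
    intro a b
    unfold pvHPass
    rw [hcv a b]
    rcases eq_or_ne a m with rfl|ha
    · by_cases hbC : b < C
      · rw [if_pos ⟨rfl, hbC⟩, if_pos ⟨by omega, hbC⟩]
        apply Finset.sum_congr rfl
        intro y _
        rw [hv a y, if_neg (by omega)]
      · rw [if_neg (by omega), hv a b, if_neg (by omega), if_neg (by omega)]
    · rw [if_neg (by intro h; exact ha (by exact_mod_cast h.1)), hv a b]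
      by_cases hsm : a < m ∧ b < C
      · rw [if_pos hsm, if_pos ⟨by omega, hsm.2⟩]
      · rw [if_neg hsm, if_neg (by omega)]

theorem pvGet2_zero (R C a b : Nat) :
    pvGet2 (List.replicate (R+1) (List.replicate (C+1) (0:Int))) a b = 0 := by
  unfold pvGet2
  have h1 : (List.replicate (R+1) (List.replicate (C+1) (0:Int))).getD a [] =
      if a < R+1 then List.replicate (C+1) (0:Int) else [] := by
    split_ifs with h
    · rw [List.getD_eq_getElem _ _ (by simpa using h), List.getElem_replicate]
    · rw [List.getD_eq_default _ _ (by simpa using Nat.le_of_not_lt h)]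
  rw [h1]
  split_ifs with h
  · rcases Nat.lt_or_ge b (C+1) with h2|h2
    · rw [List.getD_eq_getElem _ _ (by simpa using h2), List.getElem_replicate]
    · rw [List.getD_eq_default _ _ (by simpa using h2)]
  · simp [List.getD]

theorem pvDims_zero (R C : Nat) :
    pvDims (List.replicate (R+1) (List.replicate (C+1) (0:Int))) (R+1) (C+1) := by
  constructor
  · simp
  · intro r hr
    rw [List.eq_of_mem_replicate hr]
    simp

theorem pvSum_point (n : Nat) (p : Int) (w : Int) :
    (∑ x ∈ Finset.range n, if (x:Int) = p then w else 0) =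
      if 0 ≤ p ∧ p < (n:Int) then w else 0 := by
  by_cases h : 0 ≤ p ∧ p < (n:Int)
  · obtain ⟨q, rfl⟩ : ∃ q : Nat, p = (q:Int) := ⟨p.toNat, (Int.toNat_of_nonneg h.1).symm⟩
    have hq : q < n := by exact_mod_cast h.2
    rw [if_pos h]
    have e : ∀ x ∈ Finset.range n,
        (if (x:Int) = (q:Int) then w else 0) = if x = q then w else 0 := by
      intro x _
      rcases eq_or_ne x q with rfl|hx
      · rw [if_pos rfl, if_pos rfl]
      · rw [if_neg hx, if_neg (fun hh => hx (by exact_mod_cast hh))]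
    rw [Finset.sum_congr rfl e, Finset.sum_ite_eq' (Finset.range n) q (fun _ => w)]
    simp [hq]
  · rw [if_neg h]
    apply Finset.sum_eq_zero
    intro x hx
    simp only [Finset.mem_range] at hx
    rw [if_neg (by intro hh; apply h; constructor <;> omega)]

theorem pvSum_point2 (a b : Nat) (p q w : Int) :
    (∑ y ∈ Finset.range (b+1), ∑ x ∈ Finset.range (a+1),
        if (x:Int) = p ∧ (y:Int) = q then w else 0) =
      if 0 ≤ p ∧ p ≤ (a:Int) ∧ 0 ≤ q ∧ q ≤ (b:Int) then w else 0 := by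
  have hp := pvSum_point (a+1) p w
  push_cast at hp
  have step : ∀ y ∈ Finset.range (b+1),
      (∑ x ∈ Finset.range (a+1), if (x:Int) = p ∧ (y:Int) = q then w else 0)
      = if (y:Int) = q then (if 0 ≤ p ∧ p < (a:Int)+1 then w else 0) else 0 := by
    intro y _
    by_cases hy : (y:Int) = q
    · rw [if_pos hy, ← hp]
      apply Finset.sum_congr rfl
      intro x _
      simp [hy]
    · rw [if_neg hy]
      apply Finset.sum_eq_zero
      intro x _
      rw [if_neg (fun hh => hy hh.2)]
  rw [Finset.sum_congr rfl step, pvSum_point (b+1) q _]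
  push_cast
  split_ifs <;> first | rfl | omega

theorem pvSum_delta_single (R C : Nat) (sk : List Int) (hsk : pvProper R C sk) (a b : Nat) :
    (∑ y ∈ Finset.range (b+1), ∑ x ∈ Finset.range (a+1), pvDelta sk x y) =
      pvRect sk (a:Int) (b:Int) := by
  obtain ⟨t, r1, c1, r2, c2, deg, rfl, h1, h2, h3, h4, h5, h6⟩ := hsk
  set deg' := if t = 1 then -deg else deg with hdeg
  have hD : ∀ x y : Nat, pvDelta [t, r1, c1, r2, c2, deg] x y =
      (if (x:Int) = r1 ∧ (y:Int) = c1 then deg' else 0)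
      + (if (x:Int) = r1 ∧ (y:Int) = c2 + 1 then -deg' else 0)
      + (if (x:Int) = r2 + 1 ∧ (y:Int) = c1 then -deg' else 0)
      + (if (x:Int) = r2 + 1 ∧ (y:Int) = c2 + 1 then deg' else 0) := fun _ _ => rfl
  have hR : pvRect [t, r1, c1, r2, c2, deg] (a:Int) (b:Int) =
      if r1 ≤ (a:Int) ∧ (a:Int) ≤ r2 ∧ c1 ≤ (b:Int) ∧ (b:Int) ≤ c2 then deg' else 0 := rfl
  simp only [hD, hR]
  rw [Finset.sum_congr rfl (fun y _ => Finset.sum_add_distrib),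
      Finset.sum_congr rfl (fun y _ => congrArg (· + _) Finset.sum_add_distrib),
      Finset.sum_congr rfl (fun y _ => congrArg (· + _) (congrArg (· + _) Finset.sum_add_distrib))]
  rw [Finset.sum_add_distrib, Finset.sum_add_distrib, Finset.sum_add_distrib]
  rw [pvSum_point2, pvSum_point2, pvSum_point2, pvSum_point2]
  split_ifs <;> omega

theorem pvSum_delta (R C : Nat) (S : List (List Int)) (hS : ∀ sk ∈ S, pvProper R C sk)
    (a b : Nat) :
    (∑ y ∈ Finset.range (b+1), ∑ x ∈ Finset.range (a+1),
        (S.map (fun sk => pvDelta sk x y)).sum) =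
      (S.map (fun sk => pvRect sk (a:Int) (b:Int))).sum := by
  induction S with
  | nil => simp
  | cons sk S ih =>
    simp only [List.map_cons, List.sum_cons]
    rw [Finset.sum_congr rfl (fun y _ => Finset.sum_add_distrib), Finset.sum_add_distrib,
        pvSum_delta_single R C sk (hS sk (by simp)) a b,
        ih (fun x hx => hS x (by simp [hx]))]

-- B's inner loop is base + the sum of covering contributions
theorem pvContrib_eq (i j h : Int) (sk : List Int) : pvContrib i j h sk = h + pvRect sk i j := by
  cases sk with
  | nil => simp [pvContrib, pvRect]
  | cons x0 l0 =>
    rcases l0 with _|⟨x1,_|⟨x2,_|⟨x3,_|⟨x4,_|⟨x5,_|⟨x6,l⟩⟩⟩⟩⟩⟩ <;>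
      simp [pvContrib, pvRect] <;> split_ifs <;> ring

theorem pvFoldl_contrib (S : List (List Int)) (i j base : Int) :
    S.foldl (pvContrib i j) base = base + (S.map (fun sk => pvRect sk i j)).sum := by
  induction S generalizing base with
  | nil => simp
  | cons sk S ih =>
    simp only [List.foldl_cons, List.map_cons, List.sum_cons, ih, pvContrib_eq]
    ring

-- Pre_'s skill condition, destructured
theorem pvPre_proper (board : List (List Int)) (skill : List (List Int))
    (hpre : Pre_solution board skill) :
    ∀ sk ∈ skill, pvProper board.length (PySem.List.pyGetD board 0 ([] : List Int)).length sk := by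
  intro sk hsk
  obtain ⟨h6, hh⟩ := hpre.2.2 sk hsk
  rcases sk with _|⟨a0,_|⟨a1,_|⟨a2,_|⟨a3,_|⟨a4,_|⟨a5,_|⟨a6,l⟩⟩⟩⟩⟩⟩⟩ <;> simp at h6
  rw [show PySem.List.pyGetD [a0,a1,a2,a3,a4,a5] (1:Int) 0 = a1 from rfl,
      show PySem.List.pyGetD [a0,a1,a2,a3,a4,a5] (3:Int) 0 = a3 from rfl,
      show PySem.List.pyGetD [a0,a1,a2,a3,a4,a5] (2:Int) 0 = a2 from rfl,
      show PySem.List.pyGetD [a0,a1,a2,a3,a4,a5] (4:Int) 0 = a4 from rfl] at hh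
  exact ⟨a0, a1, a2, a3, a4, a5, rfl, hh.1, hh.2.1, hh.2.2.1, hh.2.2.2.1, hh.2.2.2.2.1,
    hh.2.2.2.2.2⟩

-- the final grid's value at a visible cell equals the direct per-cell sum
theorem pvFinal_cell (R C : Nat) (skill : List (List Int))
    (hS : ∀ sk ∈ skill, pvProper R C sk) (a b : Nat) (ha : a < R) (hb : b < C) :
    pvGet2 ((PySem.List.pyRange 0 (R:Int) 1).foldl (pvHPass (C:Int))
        ((PySem.List.pyRange 0 (C:Int) 1).foldl (pvVPass (R:Int))
          (skill.foldl pvStamp (List.replicate (R+1) (List.replicate (C+1) (0:Int))))))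
        a b = (skill.map (fun sk => pvRect sk (a:Int) (b:Int))).sum := by
  obtain ⟨hd1, hv1⟩ := pvGet2_stampFold R C skill _ (pvDims_zero R C) hS
  obtain ⟨hd2, hv2⟩ := pvVPass_all R C C (le_refl C) _ hd1
  obtain ⟨hd3, hv3⟩ := pvHPass_all R C R (le_refl R) _ hd2
  rw [hv3 a b, if_pos ⟨ha, hb⟩]
  have e1 : ∀ y ∈ Finset.range (b+1),
      pvGet2 ((PySem.List.pyRange 0 (C:Int) 1).foldl (pvVPass (R:Int))
        (skill.foldl pvStamp (List.replicate (R+1) (List.replicate (C+1) (0:Int))))) a y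
      = ∑ x ∈ Finset.range (a+1), (skill.map (fun sk => pvDelta sk x y)).sum := by
    intro y hy
    simp only [Finset.mem_range] at hy
    rw [hv2 a y, if_pos ⟨ha, by omega⟩]
    apply Finset.sum_congr rfl
    intro x _
    rw [hv1 x y, pvGet2_zero, zero_add]
  rw [Finset.sum_congr rfl e1, pvSum_delta R C skill hS a b]

-- ===== VERDICT (by name: the statement is the Claim_ definition above) =====
theorem solution_spec : Claim_equal_solution := by
  intro board skill _ hpre
  unfold Spec_solution solution solution_alt
  simp only [Int.toNat_natCast]
  have hS := pvPre_proper board skill hpre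
  apply PySem.List.foldl_congr_mem
  intro acc i hi
  obtain ⟨hi0, hiR⟩ := (PySem.List.mem_pyRange_one).mp hi
  unfold pvCountRowA pvRowB
  apply PySem.List.foldl_congr_mem
  intro a j hj
  obtain ⟨hj0, hjC⟩ := (PySem.List.mem_pyRange_one).mp hj
  unfold pvCountCellA pvCellB
  rw [pvFoldl_contrib]
  obtain ⟨n, rfl⟩ : ∃ n : Nat, i = (n:Int) := ⟨i.toNat, (Int.toNat_of_nonneg hi0).symm⟩
  obtain ⟨m, rfl⟩ : ∃ m : Nat, j = (m:Int) := ⟨j.toNat, (Int.toNat_of_nonneg hj0).symm⟩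
  have hfc := pvFinal_cell board.length (PySem.List.pyGetD board 0 ([] : List Int)).length
    skill hS n m (by exact_mod_cast hiR) (by exact_mod_cast hjC)
  rw [pvRead2_eq board _ _ hi0 hj0, pvRead2_eq _ _ _ hi0 hj0]
  simp only [Int.toNat_natCast, hfc]
  rfl
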